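-- pv_equiv track=rewrite | github.com/liftingring/mrSkeletal | triviaUtils.py | processScores
-- ===== SOURCE A (Python) =====
-- def processScores(triviaScores):
-- 	def order(key):
-- 		return triviaScores[key]
--
-- 	def getPlace(rank):
-- 		if rank%10==1:
-- 			end="st"
-- 		elif rank%10==2:
-- 			end="nd"
-- 		elif rank%10==3:
-- 			end="rd"
-- 		else:
-- 			end="th"
-- 		return f'{rank}{end}'
--
--
-- 	hasScores=bool(triviaScores)
-- 	if hasScores==False:
-- 		return []
-- 	else:
-- 		keys=list(triviaScores.keys())
-- 		keys.sort(key=order,reverse=True)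
-- 		orderedScores=[triviaScores[key] for key in keys]
-- 		orderedPlaces=[getPlace(orderedScores.index(score)+1) for score in orderedScores]
-- 		placeKeyScorePairs=zip(orderedPlaces,keys,orderedScores)
-- 		return placeKeyScorePairs
-- ===== SOURCE B (Python) =====
-- def processScores(triviaScores):
-- 	ordered = sorted(triviaScores.items(), key=lambda kv: kv[1], reverse=True)
-- 	result = []
-- 	place = ""
-- 	prev = None
-- 	for i, (key, score) in enumerate(ordered):
-- 		if score != prev:
-- 			rank = i + 1
-- 			suffix = {1: "st", 2: "nd", 3: "rd"}.get(rank % 10, "th")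
-- 			place = f'{rank}{suffix}'
-- 			prev = score
-- 		result.append((place, key, score))
-- 	return result
-- ===== Notes on version B (the rewrite author's own statement) =====
-- stated objective: faster
-- what changed: Replaces the per-element orderedScores.index scan (quadratic) by one sort of the items and a single pass that reuses the previous place label while the score is unchanged.
import Mathlib
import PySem

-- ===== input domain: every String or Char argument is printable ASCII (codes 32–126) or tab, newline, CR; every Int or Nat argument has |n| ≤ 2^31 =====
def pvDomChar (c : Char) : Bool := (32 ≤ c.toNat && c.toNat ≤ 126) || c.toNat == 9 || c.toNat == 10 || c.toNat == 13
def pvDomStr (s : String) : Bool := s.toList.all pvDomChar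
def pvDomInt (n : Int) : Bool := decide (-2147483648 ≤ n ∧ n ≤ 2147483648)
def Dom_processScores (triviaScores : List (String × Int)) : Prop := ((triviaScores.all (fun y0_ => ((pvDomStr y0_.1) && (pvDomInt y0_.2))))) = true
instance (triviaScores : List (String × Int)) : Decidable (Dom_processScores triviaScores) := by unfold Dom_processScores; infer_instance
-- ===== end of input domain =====

-- B replaces A's per-element .index scan over the sorted scores by one sort of the items and a
-- single pass that reuses the previous place label while the score repeats (objective: faster).


-- ===== PORT A =====
-- order(key) = triviaScores[key]: dict lookup on the association list (first match; keys unique under Pre_)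
def pvOrder (triviaScores : List (String × Int)) (k : String) : Int :=
  (List.lookup k triviaScores).getD 0

-- getPlace(rank) of A: the if/elif chain on rank % 10, then f'{rank}{end}'
def pvPlaceA (rank : Int) : String :=
  PySem.Int.toStr rank ++
    (if PySem.Int.mod rank 10 = 1 then "st"
     else if PySem.Int.mod rank 10 = 2 then "nd"
     else if PySem.Int.mod rank 10 = 3 then "rd"
     else "th")

def processScores (triviaScores : List (String × Int)) : List (String × String × Int) :=
  if triviaScores = [] then []
  else
    let keys := PySem.List.sorted (triviaScores.map (·.1)) (pvOrder triviaScores) true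
    let orderedScores := keys.map (pvOrder triviaScores)
    let orderedPlaces := orderedScores.map
      (fun score => pvPlaceA ((((PySem.List.index? orderedScores score).getD 0 : Nat) : Int) + 1))
    orderedPlaces.zip (keys.zip orderedScores)

-- ===== PORT B =====
-- {1:"st",2:"nd",3:"rd"}.get(rank % 10, "th")
def pvSuffixB (rank : Int) : String :=
  ((((PySem.Dict.empty).insert (1 : Int) "st").insert 2 "nd").insert 3 "rd").getD
    (PySem.Int.mod rank 10) "th"

-- loop body of B: state = (result, place, prev)
def pvStepB (st : List (String × String × Int) × String × Option Int)
    (p : Int × (String × Int)) : List (String × String × Int) × String × Option Int :=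
  if some p.2.2 ≠ st.2.2 then
    let rank := p.1 + 1
    let place := PySem.Int.toStr rank ++ pvSuffixB rank
    (st.1 ++ [(place, p.2.1, p.2.2)], place, some p.2.2)
  else
    (st.1 ++ [(st.2.1, p.2.1, p.2.2)], st.2)

def processScores_alt (triviaScores : List (String × Int)) : List (String × String × Int) :=
  let ordered := PySem.List.sorted triviaScores (fun kv => kv.2) true
  ((PySem.List.enumerate ordered).foldl pvStepB ([], "", none)).1

-- ===== PRECONDITION & SPEC =====
-- Pre_ excludes association lists with duplicate keys, which do not represent any Python dict
-- (A's parameter is a dict, so a duplicate key is unreachable from Python).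
def Pre_processScores (triviaScores : List (String × Int)) : Prop :=
  (triviaScores.map Prod.fst).Nodup
instance (triviaScores : List (String × Int)) : Decidable (Pre_processScores triviaScores) := by
  unfold Pre_processScores; infer_instance

def pvWitness_processScores : (List (String × Int)) := [("a", 3), ("b", 5), ("c", 3)]

def Spec_processScores (triviaScores : List (String × Int)) (out : List (String × String × Int)) : Prop := out = processScores_alt triviaScores
instance (triviaScores : List (String × Int)) (out : List (String × String × Int)) : Decidable (Spec_processScores triviaScores out) := by unfold Spec_processScores; infer_instance

-- ===== CLAIM (what is proved, stated in full; the proofs are below) =====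
def Claim_equal_processScores : Prop := ∀ (triviaScores : List (String × Int)), Dom_processScores triviaScores → Pre_processScores triviaScores → Spec_processScores triviaScores (processScores triviaScores)

-- ===== LEMMAS AND PROOFS =====

-- B's suffix dict lookup produces exactly A's if/elif chain.
theorem pvSuffix_eq (rank : Int) :
    PySem.Int.toStr rank ++ pvSuffixB rank = pvPlaceA rank := by
  have h : pvSuffixB rank = (if PySem.Int.mod rank 10 = 1 then "st"
     else if PySem.Int.mod rank 10 = 2 then "nd"
     else if PySem.Int.mod rank 10 = 3 then "rd" else "th") := by
    unfold pvSuffixB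
    set m := PySem.Int.mod rank 10 with hm
    simp [PySem.Dict.getD, PySem.Dict.get?, PySem.Dict.insert, PySem.Dict.empty]
    by_cases h1 : m = 1
    · simp [List.find?, h1]
    · by_cases h2 : m = 2
      · simp [List.find?, h2]
      · by_cases h3 : m = 3
        · simp [List.find?, h3]
        · have e1 : ((1 : Int) == m) = false := beq_eq_false_iff_ne.mpr (Ne.symm h1)
          have e2 : ((2 : Int) == m) = false := beq_eq_false_iff_ne.mpr (Ne.symm h2)
          have e3 : ((3 : Int) == m) = false := beq_eq_false_iff_ne.mpr (Ne.symm h3)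
          simp [List.find?, e1, e2, e3, h1, h2, h3]
  rw [h]; rfl

-- recursive description of B's loop
def pvRun (l : List (String × Int)) (n : Int) (pl : String) (pv : Option Int) :
    List (String × String × Int) :=
  match l with
  | [] => []
  | p :: t =>
    if some p.2 ≠ pv then
      (pvPlaceA (n + 1), p.1, p.2) :: pvRun t (n + 1) (pvPlaceA (n + 1)) (some p.2)
    else
      (pl, p.1, p.2) :: pvRun t (n + 1) pl pv

theorem pvFold_eq_run (l : List (String × Int)) (n : Int) (acc : List (String × String × Int))
    (pl : String) (pv : Option Int) :
    ((PySem.List.enumerate l n).foldl pvStepB (acc, pl, pv)).1 = acc ++ pvRun l n pl pv := by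
  induction l generalizing n acc pl pv with
  | nil => simp [PySem.List.enumerate, pvRun]
  | cons p t ih =>
    simp only [PySem.List.enumerate, List.foldl, pvRun]
    by_cases h : some p.2 ≠ pv
    · simp only [pvStepB, ih, pvSuffix_eq]
      simp [h]
    · simp only [pvStepB, h, ih]
      simp

theorem pvIndex?_append_of_not_mem {α : Type} [BEq α] [LawfulBEq α] (l t : List α) (v : α)
    (h : v ∉ l) :
    PySem.List.index? (l ++ t) v = (PySem.List.index? t v).map (· + l.length) := by
  induction l with
  | nil => simp
  | cons x xs ih =>
    have hx : x ≠ v := fun e => h (by simp [e])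
    rw [List.cons_append, PySem.List.index?_cons_of_ne _ hx,
      ih (fun hv => h (List.mem_cons_of_mem _ hv))]
    cases PySem.List.index? t v
    · simp
    · simp; omega

-- B's one pass computes A's "index of the first occurrence of the score" rank on any
-- score-descending list.
theorem pvRun_spec (l : List (String × Int)) :
    ∀ (pre : List (String × Int)) (pl : String) (pv : Option Int),
    List.Pairwise (fun a b => b.2 ≤ a.2) (pre ++ l) →
    ((pre = [] ∧ pv = none) ∨
      (∃ lp, pre.getLast? = some lp ∧ pv = some lp.2 ∧
        pl = pvPlaceA ((((PySem.List.index? ((pre ++ l).map (·.2)) lp.2).getD 0 : Nat) : Int) + 1))) →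
    pvRun l (pre.length : Int) pl pv =
      l.map (fun p =>
        (pvPlaceA ((((PySem.List.index? ((pre ++ l).map (·.2)) p.2).getD 0 : Nat) : Int) + 1),
         p.1, p.2)) := by
  induction l with
  | nil => intro pre pl pv _ _; simp [pvRun]
  | cons p t ih =>
    intro pre pl pv hdesc hstate
    have hsplit := (List.pairwise_append.mp hdesc)
    have hcross : ∀ a ∈ pre, ∀ b ∈ p :: t, b.2 ≤ a.2 := hsplit.2.2
    have hassoc : (pre ++ [p]) ++ t = pre ++ p :: t := by simp
    by_cases hnew : some p.2 ≠ pv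
    · -- new score: p.2 does not occur among pre's scores
      have hnotmem : p.2 ∉ pre.map (·.2) := by
        intro hmem
        rcases List.mem_map.mp hmem with ⟨q, hq, hq2⟩
        rcases hstate with ⟨hpre, _⟩ | ⟨lp, hlast, hpv, _⟩
        · subst hpre; simp at hq
        · rcases List.getLast?_eq_some_iff.mp hlast with ⟨pre', rfl⟩
          have hlp_le : p.2 ≤ lp.2 := hcross lp (by simp) p (by simp)
          have hq_ge : lp.2 ≤ q.2 := by
            rcases List.mem_append.mp hq with hq' | hq''
            · exact (List.pairwise_append.mp hsplit.1).2.2 q hq' lp (by simp)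
            · simp at hq''; subst hq''; exact le_refl _
          have : lp.2 = p.2 := by rw [hq2] at hq_ge; omega
          exact hnew (by rw [hpv, this])
      have hidx : PySem.List.index? ((pre ++ p :: t).map (·.2)) p.2 = some pre.length := by
        rw [List.map_append]
        rw [pvIndex?_append_of_not_mem _ _ _ hnotmem]
        simp only [List.map_cons]
        rw [PySem.List.index?_cons_self]
        simp
      rw [pvRun]
      rw [if_pos hnew]
      have hlen : (pre.length : Int) + 1 = ((pre ++ [p]).length : Int) := by simp
      rw [hlen]
      rw [ih (pre ++ [p]) (pvPlaceA ((pre ++ [p]).length : Int)) (some p.2)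
        (by rw [hassoc]; exact hdesc)
        (Or.inr ⟨p, by simp, rfl, by rw [hassoc, hidx]; simp⟩)]
      rw [hassoc]
      simp only [List.map]
      rw [hidx]
      simp
    · -- repeated score: the stored place is the first occurrence's place
      push Not at hnew
      rcases hstate with ⟨hpre, hpv⟩ | ⟨lp, hlast, hpv, hpl⟩
      · rw [hpv] at hnew; exact absurd hnew (by simp)
      · have hlp2 : lp.2 = p.2 := by rw [hpv] at hnew; exact (Option.some.inj hnew).symm
        rw [pvRun]
        rw [if_neg (by rw [hpv, hlp2]; simp)]
        have hlen : (pre.length : Int) + 1 = ((pre ++ [p]).length : Int) := by simp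
        rw [hlen]
        rw [ih (pre ++ [p]) pl pv
          (by rw [hassoc]; exact hdesc)
          (Or.inr ⟨p, by simp, by rw [hpv, hlp2], by rw [hassoc]; rw [hpl, hlp2]⟩)]
        rw [hassoc]
        simp only [List.map]
        rw [hpl, hlp2]

theorem pvInsertBy_map {α β : Type} (p : β → β → Bool) (f : α → β) (x : α) (l : List α) :
    PySem.List.insertBy p (f x) (l.map f) =
      (PySem.List.insertBy (fun a b => p (f a) (f b)) x l).map f := by
  induction l with
  | nil => rfl
  | cons y ys ih =>
    simp only [List.map, PySem.List.insertBy]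
    by_cases h : p (f x) (f y) <;> simp [h, ih]

-- Python's stable sort commutes with mapping: sorting mapped elements by g is mapping the
-- elements sorted by g ∘ f.
theorem pvSorted_map {α β : Type} (l : List α) (f : α → β) (g : β → Int) :
    PySem.List.sorted (l.map f) g true =
      (PySem.List.sorted l (fun a => g (f a)) true).map f := by
  rw [PySem.List.sorted_rev_eq_foldl_insertBy, PySem.List.sorted_rev_eq_foldl_insertBy]
  suffices h : ∀ acc, (l.map f).foldl
      (fun acc x => PySem.List.insertBy (fun a b => decide (g b < g a)) x acc) (acc.map f)
      = (l.foldl (fun acc x =>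
          PySem.List.insertBy (fun a b => decide (g (f b) < g (f a))) x acc) acc).map f by
    simpa using h []
  induction l with
  | nil => intro acc; simp
  | cons y ys ih =>
    intro acc
    simp only [List.map, List.foldl]
    rw [pvInsertBy_map (fun a b => decide (g b < g a)) f y acc]
    exact ih _

theorem pvLookup_self (ts : List (String × Int)) (h : (ts.map Prod.fst).Nodup) :
    ∀ p ∈ ts, List.lookup p.1 ts = some p.2 := by
  induction ts with
  | nil => simp
  | cons q t ih =>
    intro p hp
    simp only [List.map, List.nodup_cons] at h
    rcases List.mem_cons.mp hp with e | hp
    · subst e; simp [List.lookup]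
    · have hne : p.1 ≠ q.1 := by
        intro e; exact h.1 (e ▸ (List.mem_map.mpr ⟨p, hp, rfl⟩))
      simp [List.lookup, beq_eq_false_iff_ne.mpr hne, ih h.2 p hp]

theorem pvMap_pair (ts : List (String × Int)) (h : (ts.map Prod.fst).Nodup) :
    (ts.map (·.1)).map (fun k => (k, pvOrder ts k)) = ts := by
  rw [List.map_map]
  conv_rhs => rw [← List.map_id ts]
  refine List.map_congr_left ?_
  intro p hp
  simp [Function.comp, pvOrder, pvLookup_self ts h p hp]

-- ===== VERDICT (by name: the statement is the Claim_ definition above) =====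
theorem processScores_spec : Claim_equal_processScores := by
  intro ts _hdom hpre
  unfold Spec_processScores
  have hB : processScores_alt ts =
      (PySem.List.sorted ts (fun kv => kv.2) true).map (fun p =>
        (pvPlaceA ((((PySem.List.index?
            ((PySem.List.sorted ts (fun kv => kv.2) true).map (·.2)) p.2).getD 0 : Nat) : Int) + 1),
         p.1, p.2)) := by
    unfold processScores_alt
    rw [pvFold_eq_run]
    simpa using pvRun_spec (PySem.List.sorted ts (fun kv => kv.2) true) [] "" none
      (by simpa using PySem.List.sorted_pairwise_rev ts (fun kv => kv.2))
      (Or.inl ⟨rfl, rfl⟩)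
  by_cases hts : ts = []
  · subst hts
    simp [processScores, hB, PySem.List.sorted]
  · have hord : PySem.List.sorted ts (fun kv => kv.2) true =
        (PySem.List.sorted (ts.map (·.1)) (pvOrder ts) true).map (fun k => (k, pvOrder ts k)) := by
      conv_lhs => rw [← pvMap_pair ts hpre]
      exact pvSorted_map (ts.map (·.1)) (fun k => (k, pvOrder ts k)) (fun kv => kv.2)
    rw [hB, hord]
    unfold processScores
    rw [if_neg hts]
    simp only [List.map_map, List.zip_map', ← List.map_prod_left_eq_zip]
    simp only [Function.comp]
    simp
    intros
    rfl
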